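-- pv_equiv track=rewrite | github.com/libihan/- | 头条_0324/2018春招实习笔试总结.py | countStep
-- ===== SOURCE A (Python) =====
-- def countStep(n):
--     step = 0
--     queue = [(1,1,step)]    # 初始化为(s,m)
--
--     while queue:
--         size = len(queue)
--         for i in range(size):
--             temp = queue.pop(0)
--             if temp[0] == n:
--                 return step
--             # 采用①
--             if temp[0]*2 <= n:
--                 queue.append((temp[0]*2,temp[0]))
--             # 采用②
--             if temp[0] + temp[1] <= n:
--                 queue.append((temp[0] + temp[1],temp[1]))
--         step += 1  # 每遍历一层，步数+1
-- ===== SOURCE B (Python) =====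
-- def countStep(n):
--     # Closed form: the minimum number of ops is the sum of (p - 1) over the
--     # prime factorization of n (each prime factor p costs one "copy+paste"
--     # double plus p-2 pastes); n < 1 is unreachable, so no value (None).
--     if n < 1:
--         return None
--     ops = 0
--     m = n
--     while m > 1:
--         d = 2
--         while m % d:
--             d += 1
--         ops += d - 1
--         m //= d
--     return ops
-- ===== Notes on version B (the rewrite author's own statement) =====
-- stated objective: faster
-- what changed: B abandons the search entirely: the minimum step count is the sum of (p - 1) over the prime factorization of n (each prime factor p is realized by one double plus p-2 pastes, and any path's cost is at least that), so B just trial-divides n; A runs an exponential duplicate-keeping BFS.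
import Mathlib
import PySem

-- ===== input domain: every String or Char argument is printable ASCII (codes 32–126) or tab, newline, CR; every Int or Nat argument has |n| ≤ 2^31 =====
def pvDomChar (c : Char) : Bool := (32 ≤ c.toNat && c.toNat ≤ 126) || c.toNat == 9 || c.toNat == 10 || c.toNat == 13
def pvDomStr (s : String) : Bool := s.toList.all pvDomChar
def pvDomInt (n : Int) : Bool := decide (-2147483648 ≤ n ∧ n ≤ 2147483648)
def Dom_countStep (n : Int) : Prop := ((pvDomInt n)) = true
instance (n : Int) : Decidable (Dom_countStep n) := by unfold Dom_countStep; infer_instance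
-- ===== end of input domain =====

-- B replaces A's exponential duplicate-keeping BFS by the closed form: the answer is the
-- sum of (p - 1) over the prime factorization of n, computed by trial division.

-- ===== PORT A =====
-- children appended for a popped state (s, m): double (if 2s ≤ n), then paste (if s+m ≤ n)
def childA (n : Int) (t : Int × Int) : List (Int × Int) :=
  (if 2 * t.1 ≤ n then [(2 * t.1, t.1)] else []) ++
  (if t.1 + t.2 ≤ n then [(t.1 + t.2, t.2)] else [])

-- the inner 'for i in range(size)' loop: pop each element of the current level in order,
-- return none when temp[0] == n fires (Python's 'return step'), otherwise the queue after
-- the level's appends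
def innerA (n : Int) : List (Int × Int) → List (Int × Int) → Option (List (Int × Int))
  | [], acc => some acc
  | t :: rest, acc => if t.1 = n then none else innerA n rest (acc ++ childA n t)

-- the 'while queue' loop; fuel n.toNat + 2 strictly exceeds the number of iterations the
-- Python performs (every state at level k has first component ≥ k + 1 and children are
-- kept only when ≤ n, so the queue is empty after at most n + 1 levels), hence the
-- fuel-out 'none' branch is never reached on any input
def loopA (n : Int) : Nat → List (Int × Int) → Int → Option Int
  | 0, _, _ => none
  | fuel + 1, q, step =>
    if q.isEmpty then none
    else
      match innerA n q [] with
      | none => some step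
      | some q' => loopA n fuel q' (step + 1)

def countStep (n : Int) : Option Int := loopA n (n.toNat + 2) [(1, 1)] 0

-- ===== PORT B =====
-- the inner 'while m % d: d += 1' scan; fuel m+1 strictly exceeds the number of
-- increments the Python performs (the scan stops no later than d = m since m % m == 0)
def scanD (m : Int) : Nat → Int → Int
  | 0, d => d
  | fuel + 1, d => if m % d = 0 then d else scanD m fuel (d + 1)

-- the outer 'while m > 1' loop; fuel m exceeds the iteration count (m strictly decreases
-- and stays ≥ 1), so the fuel-out branch is never reached on any input
def stripB : Nat → Int → Int → Int
  | 0, _, ops => ops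
  | fuel + 1, m, ops =>
    if 1 < m then
      let d := scanD m (m.toNat + 1) 2
      stripB fuel (m / d) (ops + (d - 1))
    else ops

def countStep_alt (n : Int) : Option Int :=
  if n < 1 then none else some (stripB n.toNat n 0)

-- ===== PRECONDITION & SPEC =====
def Spec_countStep (n : Int) (out : Option Int) : Prop := out = countStep_alt n
instance (n : Int) (out : Option Int) : Decidable (Spec_countStep n out) := by
  unfold Spec_countStep; infer_instance

-- ===== CLAIM (what is proved, stated in full; the proofs are below) =====
def Claim_equal_countStep : Prop := ∀ (n : Int), Dom_countStep n → Spec_countStep n (countStep n)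

-- ===== LEMMAS AND PROOFS =====

-- the closed form: sum of (p - 1) over the prime factorization
def gSum (m : Nat) : Nat := ((Nat.primeFactorsList m).map (fun p => p - 1)).sum

lemma gSum_one : gSum 1 = 0 := by simp [gSum]

lemma gSum_rec (m : Nat) (h : 2 ≤ m) :
    gSum m = (m.minFac - 1) + gSum (m / m.minFac) := by
  obtain ⟨k, rfl⟩ : ∃ k, m = k + 2 := ⟨m - 2, by omega⟩
  rw [gSum, Nat.primeFactorsList]
  simp [gSum]

lemma gSum_mul (a b : Nat) (ha : a ≠ 0) (hb : b ≠ 0) : gSum (a * b) = gSum a + gSum b := by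
  have hperm := (Nat.perm_primeFactorsList_mul ha hb).map (fun p => p - 1)
  unfold gSum
  rw [hperm.sum_eq, List.map_append, List.sum_append]

lemma sum_le_prod (l : List Nat) (h : ∀ p ∈ l, 2 ≤ p) :
    (l.map (fun p => p - 1)).sum + 1 ≤ l.prod := by
  induction l with
  | nil => simp
  | cons p l ih =>
    have hp : 2 ≤ p := h p (by simp)
    have hl : (l.map (fun p => p - 1)).sum + 1 ≤ l.prod := ih (fun q hq => h q (by simp [hq]))
    simp only [List.map_cons, List.sum_cons, List.prod_cons]
    have h1 : p * ((l.map (fun p => p - 1)).sum + 1) ≤ p * l.prod := Nat.mul_le_mul_left p hl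
    have h2 : (l.map (fun p => p - 1)).sum ≤ p * (l.map (fun p => p - 1)).sum :=
      Nat.le_mul_of_pos_left _ (by omega)
    have h3 : p * ((l.map (fun p => p - 1)).sum + 1) = p * (l.map (fun p => p - 1)).sum + p := by
      ring
    omega

lemma gSum_le (m : Nat) (h : 1 ≤ m) : gSum m + 1 ≤ m := by
  have := sum_le_prod (Nat.primeFactorsList m)
    (fun p hp => (Nat.prime_of_mem_primeFactorsList hp).two_le)
  rwa [Nat.prod_primeFactorsList (by omega)] at this

lemma gSum_split {a b : Nat} (ha : 1 ≤ a) (hb : 1 ≤ b) (hd : b ∣ a) :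
    gSum a + 1 ≤ gSum b + a / b := by
  have hq : 1 ≤ a / b := Nat.one_le_div_iff (by omega) |>.mpr (Nat.le_of_dvd ha hd)
  have hmul : b * (a / b) = a := Nat.mul_div_cancel' hd
  have h1 : gSum a = gSum b + gSum (a / b) := by
    have := gSum_mul b (a / b) (by omega) (by omega)
    rw [hmul] at this
    exact this
  have h2 := gSum_le (a / b) hq
  omega

-- reachability: Reach n ℓ t ↔ t is a state on BFS level ℓ of A's search
inductive Reach (n : Int) : Nat → Int × Int → Prop
  | base : Reach n 0 (1, 1)
  | dbl {ℓ : Nat} {s m : Int} : Reach n ℓ (s, m) → 2 * s ≤ n → Reach n (ℓ + 1) (2 * s, s)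
  | add {ℓ : Nat} {s m : Int} : Reach n ℓ (s, m) → s + m ≤ n → Reach n (ℓ + 1) (s + m, m)

def levels (n : Int) : Nat → List (Int × Int)
  | 0 => [(1, 1)]
  | ℓ + 1 => (levels n ℓ).flatMap (childA n)

lemma mem_childA (n : Int) (u t : Int × Int) :
    t ∈ childA n u ↔ (2 * u.1 ≤ n ∧ t = (2 * u.1, u.1)) ∨ (u.1 + u.2 ≤ n ∧ t = (u.1 + u.2, u.2)) := by
  unfold childA
  split_ifs with h1 h2 h2 <;> simp [h1, h2]

lemma mem_levels (n : Int) (ℓ : Nat) (t : Int × Int) :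
    t ∈ levels n ℓ ↔ Reach n ℓ t := by
  induction ℓ generalizing t with
  | zero =>
    simp only [levels, List.mem_singleton]
    constructor
    · rintro rfl; exact Reach.base
    · intro h; cases h; rfl
  | succ ℓ ih =>
    simp only [levels, List.mem_flatMap]
    constructor
    · rintro ⟨u, hu, ht⟩
      have hr : Reach n ℓ (u.1, u.2) := by rw [Prod.mk.eta]; exact (ih u).mp hu
      rcases (mem_childA n u t).mp ht with ⟨hle, rfl⟩ | ⟨hle, rfl⟩
      · exact Reach.dbl hr hle
      · exact Reach.add hr hle
    · intro h
      cases h with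
      | dbl hr hle =>
        rename_i s m
        exact ⟨(s, m), (ih _).mpr hr, (mem_childA n _ _).mpr (Or.inl ⟨hle, rfl⟩)⟩
      | add hr hle =>
        rename_i s m
        exact ⟨(s, m), (ih _).mpr hr, (mem_childA n _ _).mpr (Or.inr ⟨hle, rfl⟩)⟩

-- the divisibility invariant: every reachable state (s, m) has m | s and a level lower
-- bound gSum m + s/m - 1
lemma reach_inv {n : Int} {ℓ : Nat} {t : Int × Int} (h : Reach n ℓ t) :
    ∃ a b : Nat, t.1 = (a : Int) ∧ t.2 = (b : Int) ∧ 1 ≤ a ∧ 1 ≤ b ∧ b ∣ a ∧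
      gSum b + a / b ≤ ℓ + 1 := by
  induction h with
  | base => exact ⟨1, 1, rfl, rfl, le_refl _, le_refl _, dvd_refl _, by simp [gSum_one]⟩
  | dbl hr hle ih =>
    rename_i ℓ0 s0 m0
    obtain ⟨a, b, h1, h2, ha, hb, hd, hg⟩ := ih
    have h1' : s0 = (a : Int) := h1
    refine ⟨2 * a, a, by rw [show (2 * s0, s0).1 = 2 * s0 from rfl, h1']; push_cast; ring,
      by rw [show (2 * s0, s0).2 = s0 from rfl, h1'], by omega, ha, ⟨2, by ring⟩, ?_⟩
    have h2a : 2 * a / a = 2 := by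
      rw [Nat.mul_div_assoc 2 (dvd_refl a), Nat.div_self (by omega)]
    rw [h2a]
    have := gSum_split ha hb hd
    omega
  | add hr hle ih =>
    rename_i ℓ0 s0 m0
    obtain ⟨a, b, h1, h2, ha, hb, hd, hg⟩ := ih
    have h1' : s0 = (a : Int) := h1
    have h2' : m0 = (b : Int) := h2
    refine ⟨a + b, b, by rw [show (s0 + m0, m0).1 = s0 + m0 from rfl, h1', h2']; push_cast; ring,
      by rw [show (s0 + m0, m0).2 = m0 from rfl, h2'], by omega, hb,
      dvd_add hd (dvd_refl b), ?_⟩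
    rw [Nat.add_div_right _ (by omega : 0 < b)]
    omega

lemma reach_lower {n : Int} {ℓ : Nat} {t : Int × Int} (h : Reach n ℓ t) (ht : t.1 = n) :
    gSum n.toNat ≤ ℓ := by
  obtain ⟨a, b, h1, h2, ha, hb, hd, hg⟩ := reach_inv h
  have han : n.toNat = a := by rw [ht] at h1; omega
  have := gSum_split ha hb hd
  rw [han]
  omega

lemma reach_pos {n : Int} {ℓ : Nat} {t : Int × Int} (h : Reach n ℓ t) :
    1 ≤ t.1 ∧ 1 ≤ t.2 := by
  obtain ⟨a, b, h1, h2, ha, hb, _, _⟩ := reach_inv h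
  constructor <;> omega

-- existence: j consecutive pastes
lemma reach_pastes {n : Int} {ℓ : Nat} {s m : Int} (h : Reach n ℓ (s, m)) :
    ∀ j : Nat, s + (j : Int) * m ≤ n → Reach n (ℓ + j) (s + (j : Int) * m, m) := by
  intro j
  induction j with
  | zero => intro _; simp only [Nat.cast_zero, zero_mul, add_zero]; exact h
  | succ j ih =>
    intro hle
    have hm : 1 ≤ m := (reach_pos h).2
    have hexp : ((j + 1 : Nat) : Int) * m = (j : Int) * m + m := by push_cast; ring
    rw [hexp] at hle
    have hstep : s + (j : Int) * m ≤ n := by linarith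
    have := Reach.add (ih hstep) (by linarith)
    have heq : s + (j : Int) * m + m = s + ((j + 1 : Nat) : Int) * m := by push_cast; ring
    rw [heq] at this
    exact this

-- existence: one factor p ≥ 2 costs p - 1 steps (one double, p - 2 pastes)
lemma reach_factor {n : Int} {ℓ : Nat} {s m : Int} {p : Nat} (h : Reach n ℓ (s, m))
    (hp : 2 ≤ p) (hpn : s * (p : Int) ≤ n) : Reach n (ℓ + (p - 1)) (s * (p : Int), s) := by
  have hs : 1 ≤ s := (reach_pos h).1
  have hdl : 2 * s ≤ n := by nlinarith [hpn, hs, (by exact_mod_cast hp : (2 : Int) ≤ (p : Int))]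
  have hdbl := Reach.dbl h hdl
  have hval : 2 * s + ((p - 2 : Nat) : Int) * s = s * (p : Int) := by
    have : ((p - 2 : Nat) : Int) = (p : Int) - 2 := by omega
    rw [this]; ring
  have := reach_pastes hdbl (p - 2) (by rw [hval]; exact hpn)
  rw [hval] at this
  have hlevel : ℓ + 1 + (p - 2) = ℓ + (p - 1) := by omega
  rwa [hlevel] at this

-- existence: a whole factor list
lemma reach_list {n : Int} (l : List Nat) (hl : ∀ p ∈ l, 2 ≤ p) :
    ∀ (ℓ : Nat) (s m : Int), Reach n ℓ (s, m) → s * (l.prod : Int) ≤ n →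
      ∃ m', Reach n (ℓ + (l.map (fun p => p - 1)).sum) (s * (l.prod : Int), m') := by
  induction l with
  | nil => intro ℓ s m h _; exact ⟨m, by simpa using h⟩
  | cons p l ih =>
    intro ℓ s m h hle
    have hs : 1 ≤ s := (reach_pos h).1
    have hp : 2 ≤ p := hl p (by simp)
    have hprodl : 1 ≤ l.prod := by
      apply List.one_le_prod
      intro q hq; have := hl q (by simp [hq]); omega
    have hcons : (((p :: l).prod : Nat) : Int) = (p : Int) * (l.prod : Int) := by
      rw [List.prod_cons]; push_cast; ring
    rw [hcons, ← mul_assoc] at hle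
    have hP1 : (1 : Int) ≤ (l.prod : Int) := by exact_mod_cast hprodl
    have hp2 : (2 : Int) ≤ (p : Int) := by exact_mod_cast hp
    have hsp : s * (p : Int) ≤ n := by
      have h0 : 0 ≤ s * (p : Int) := by positivity
      have := mul_le_mul_of_nonneg_left hP1 h0
      calc s * (p : Int) = s * (p : Int) * 1 := by ring
        _ ≤ s * (p : Int) * (l.prod : Int) := this
        _ ≤ n := hle
    have hf := reach_factor h hp hsp
    obtain ⟨m', hm'⟩ := ih (fun q hq => hl q (by simp [hq])) (ℓ + (p - 1)) (s * (p : Int)) s hf hle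
    refine ⟨m', ?_⟩
    have heq2 : ℓ + (p - 1) + (l.map (fun p => p - 1)).sum
        = ℓ + ((p :: l).map (fun p => p - 1)).sum := by simp; omega
    rw [hcons, ← mul_assoc, ← heq2]
    exact hm'

lemma reach_exists {n : Int} (hn : 1 ≤ n) :
    ∃ m', Reach n (gSum n.toNat) ((n.toNat : Int), m') := by
  have hnn : 1 ≤ n.toNat := by omega
  have hcast : ((n.toNat : Nat) : Int) = n := by omega
  have := reach_list (n := n) (Nat.primeFactorsList n.toNat)
    (fun p hp => (Nat.prime_of_mem_primeFactorsList hp).two_le) 0 1 1 Reach.base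
    (by rw [Nat.prod_primeFactorsList (by omega)]; simpa [hcast] using le_refl n)
  simp only [Nat.prod_primeFactorsList (show n.toNat ≠ 0 by omega), one_mul, zero_add] at this
  unfold gSum
  exact this

lemma reach_prefix {n : Int} {ℓ : Nat} {t : Int × Int} (h : Reach n ℓ t) :
    ∀ ℓ' ≤ ℓ, ∃ t', Reach n ℓ' t' := by
  induction h with
  | base => intro ℓ' hℓ'; interval_cases ℓ'; exact ⟨(1, 1), Reach.base⟩
  | dbl hr hle ih =>
    rename_i ℓ0 s0 m0
    intro ℓ' hℓ'
    rcases Nat.lt_or_ge ℓ' (ℓ0 + 1) with h' | h'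
    · exact ih ℓ' (by omega)
    · have he : ℓ' = ℓ0 + 1 := by omega
      subst he
      exact ⟨_, Reach.dbl hr hle⟩
  | add hr hle ih =>
    rename_i ℓ0 s0 m0
    intro ℓ' hℓ'
    rcases Nat.lt_or_ge ℓ' (ℓ0 + 1) with h' | h'
    · exact ih ℓ' (by omega)
    · have he : ℓ' = ℓ0 + 1 := by omega
      subst he
      exact ⟨_, Reach.add hr hle⟩

-- facts about innerA (A's inner for-loop)
lemma innerA_eq_none_iff (n : Int) (q acc : List (Int × Int)) :
    innerA n q acc = none ↔ ∃ t ∈ q, t.1 = n := by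
  induction q generalizing acc with
  | nil => simp [innerA]
  | cons t rest ih =>
    by_cases h : t.1 = n
    · simp [innerA, h]
    · simp [innerA, h, ih]

lemma innerA_eq_some (n : Int) (q acc : List (Int × Int)) (h : ∀ t ∈ q, t.1 ≠ n) :
    innerA n q acc = some (acc ++ q.flatMap (childA n)) := by
  induction q generalizing acc with
  | nil => simp [innerA]
  | cons t rest ih =>
    have ht : t.1 ≠ n := h t (by simp)
    simp only [innerA, if_neg ht]
    rw [ih _ (fun x hx => h x (by simp [hx]))]
    simp

-- A's outer loop run from BFS level ℓ returns gSum n.toNat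
lemma loopA_levels (n : Int) (hn : 1 ≤ n) :
    ∀ (j ℓ : Nat), ℓ + j = gSum n.toNat → ∀ fuel, j + 1 ≤ fuel →
      loopA n fuel (levels n ℓ) (ℓ : Int) = some ((gSum n.toNat : Nat) : Int) := by
  intro j
  induction j with
  | zero =>
    intro ℓ hℓ fuel hfuel
    obtain ⟨fuel, rfl⟩ : ∃ f, fuel = f + 1 := ⟨fuel - 1, by omega⟩
    obtain ⟨m', hm'⟩ := reach_exists hn
    have hmem : ((n.toNat : Int), m') ∈ levels n ℓ := by
      rw [mem_levels]; rw [show ℓ = gSum n.toNat by omega]; exact hm'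
    have hne : (levels n ℓ).isEmpty = false := by
      rw [List.isEmpty_eq_false_iff_exists_mem]; exact ⟨_, hmem⟩
    have hhit : innerA n (levels n ℓ) [] = none := by
      rw [innerA_eq_none_iff]
      exact ⟨_, hmem, by simp; omega⟩
    simp [loopA, hne, hhit]
    omega
  | succ j ih =>
    intro ℓ hℓ fuel hfuel
    obtain ⟨fuel, rfl⟩ : ∃ f, fuel = f + 1 := ⟨fuel - 1, by omega⟩
    obtain ⟨m', hm'⟩ := reach_exists hn
    have hpre := reach_prefix hm' ℓ (by omega)
    obtain ⟨t', ht'⟩ := hpre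
    have hne : (levels n ℓ).isEmpty = false := by
      rw [List.isEmpty_eq_false_iff_exists_mem]
      exact ⟨t', (mem_levels n ℓ t').mpr ht'⟩
    have hmiss : ∀ t ∈ levels n ℓ, t.1 ≠ n := by
      intro t ht hteq
      have := reach_lower ((mem_levels n ℓ t).mp ht) hteq
      omega
    have hsome := innerA_eq_some n (levels n ℓ) [] hmiss
    have hnext : ([] : List (Int × Int)) ++ (levels n ℓ).flatMap (childA n) = levels n (ℓ + 1) := by
      simp [levels]
    simp only [loopA, hne, Bool.false_eq_true, if_false, hsome, hnext]
    have hstep : (ℓ : Int) + 1 = ((ℓ + 1 : Nat) : Int) := by push_cast; ring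
    rw [hstep]
    exact ih (ℓ + 1) (by omega) fuel (by omega)

-- A on n < 1: the single state (1, 1) has no children, the queue empties, Python returns None
lemma countStep_neg (n : Int) (hn : n < 1) : countStep n = none := by
  have h0 : n.toNat = 0 := by omega
  have h1 : ¬((1 : Int) = n) := by omega
  have h2 : ¬((2 : Int) ≤ n) := by omega
  have hc : childA n (1, 1) = [] := by
    unfold childA
    norm_num [h2]
  rw [countStep, h0]
  simp [loopA, innerA, hc, h1]

-- B's inner scan finds the least divisor ≥ 2, i.e. minFac
lemma scanD_eq (m : Nat) (hm : 2 ≤ m) :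
    ∀ (fuel : Nat) (d : Nat), 2 ≤ d → d ≤ m.minFac → m.minFac + 1 ≤ fuel + d →
      scanD (m : Int) fuel (d : Int) = (m.minFac : Int) := by
  intro fuel
  induction fuel with
  | zero =>
    intro d hd hdm hfuel
    omega
  | succ fuel ih =>
    intro d hd hdm hfuel
    by_cases hdvd : d ∣ m
    · have hle : m.minFac ≤ d := Nat.minFac_le_of_dvd hd hdvd
      have hde : d = m.minFac := by omega
      have hmod : (m : Int) % (d : Int) = 0 := by
        rcases hdvd with ⟨k, rfl⟩
        push_cast
        exact Int.mul_emod_right _ _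
      simp only [scanD]
      rw [if_pos hmod, hde]
    · have hmod : (m : Int) % (d : Int) ≠ 0 := by
        intro h
        apply hdvd
        have : ((m % d : Nat) : Int) = (m : Int) % (d : Int) := by push_cast; rfl
        have hz : m % d = 0 := by omega
        exact Nat.dvd_of_mod_eq_zero hz
      have hlt : d < m.minFac := by
        rcases Nat.lt_or_ge d m.minFac with h | h
        · exact h
        · exfalso; exact hdvd (by rw [show d = m.minFac by omega]; exact Nat.minFac_dvd m)
      have := ih (d + 1) (by omega) (by omega) (by omega)
      simp only [scanD, if_neg hmod]
      rw [show (d : Int) + 1 = ((d + 1 : Nat) : Int) by push_cast; ring]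
      exact this

lemma scanD_minFac (m : Nat) (hm : 2 ≤ m) :
    scanD (m : Int) (((m : Int)).toNat + 1) 2 = (m.minFac : Int) := by
  have h1 : ((m : Int)).toNat = m := by omega
  have h2 : m.minFac ≤ m := Nat.minFac_le (by omega)
  have h3 : 2 ≤ m.minFac := (Nat.minFac_prime (by omega : m ≠ 1)).two_le
  rw [h1, show ((2 : Int)) = ((2 : Nat) : Int) by norm_num]
  exact scanD_eq m hm (m + 1) 2 (le_refl _) h3 (by omega)

-- B's outer loop computes ops + gSum m
lemma stripB_eq : ∀ (fuel m : Nat) (ops : Int), 1 ≤ m → m ≤ fuel →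
    stripB fuel (m : Int) ops = ops + ((gSum m : Nat) : Int) := by
  intro fuel
  induction fuel with
  | zero => intro m ops h1 h2; omega
  | succ fuel ih =>
    intro m ops h1 h2
    by_cases hm : m = 1
    · subst hm
      simp [stripB, gSum_one]
    · have hm2 : 2 ≤ m := by omega
      have hlt : (1 : Int) < (m : Int) := by exact_mod_cast hm2
      have hfac2 : 2 ≤ m.minFac := (Nat.minFac_prime (by omega : m ≠ 1)).two_le
      have hdvd : m.minFac ∣ m := Nat.minFac_dvd m
      have hq1 : 1 ≤ m / m.minFac :=
        Nat.one_le_div_iff (by omega) |>.mpr (Nat.le_of_dvd (by omega) hdvd)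
      have hqlt : m / m.minFac < m := Nat.div_lt_self (by omega) (by omega)
      have hdiv : (m : Int) / ((m.minFac : Nat) : Int) = ((m / m.minFac : Nat) : Int) :=
        (Int.natCast_div m m.minFac).symm
      simp only [stripB, if_pos hlt, scanD_minFac m hm2, hdiv]
      rw [ih (m / m.minFac) _ hq1 (by omega)]
      have := gSum_rec m hm2
      have hc : ((m.minFac - 1 : Nat) : Int) = (m.minFac : Int) - 1 := by omega
      omega

-- ===== VERDICT (by name: the statement is the Claim_ definition above) =====
theorem countStep_spec : Claim_equal_countStep := by
  intro n _
  show countStep n = countStep_alt n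
  by_cases hn : n < 1
  · rw [countStep_neg n hn]
    simp [countStep_alt, hn]
  · rw [not_lt] at hn
    have hnn : 1 ≤ n.toNat := by omega
    have hcast : ((n.toNat : Nat) : Int) = n := by omega
    have hg := gSum_le n.toNat hnn
    have hA : countStep n = some ((gSum n.toNat : Nat) : Int) := by
      have := loopA_levels n hn (gSum n.toNat) 0 (by omega) (n.toNat + 2) (by omega)
      simpa [countStep, levels] using this
    have hB : countStep_alt n = some ((gSum n.toNat : Nat) : Int) := by
      unfold countStep_alt
      rw [if_neg (by omega)]
      have hs := stripB_eq n.toNat n.toNat 0 hnn (le_refl _)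
      rw [hcast] at hs
      rw [hs]
      simp
    rw [hA, hB]
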